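-- pv_equiv track=rewrite | github.com/executive-assistant/ken | src/middleware/memory_learning.py | _contains_preference
-- ===== SOURCE A (Python) =====
-- def _contains_preference(text: str) -> bool:
--     """Check if text contains a preference indicator."""
--     indicators = [
--         "i prefer",
--         "i like",
--         "i'd rather",
--         "my preference",
--         "always use",
--         "never use",
--         "please use",
--     ]
--     return any(ind in text for ind in indicators)
-- ===== SOURCE B (Python) =====
-- def _contains_preference(text: str) -> bool:
--     """Check if text contains a preference indicator (single left-to-right scan)."""
--     phrases = (
--         "i prefer",
--         "i like",
--         "i'd rather",
--         "my preference",
--         "always use",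
--         "never use",
--         "please use",
--     )
--     for i in range(len(text)):
--         for p in phrases:
--             if text.startswith(p, i):
--                 return True
--     return False
-- ===== Notes on version B (the rewrite author's own statement) =====
-- stated objective: alternative
-- what changed: Replaces seven independent substring searches (any(ind in text)) with a single left-to-right scan over positions, testing at each position whether any of the seven phrases starts there.
import Mathlib
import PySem

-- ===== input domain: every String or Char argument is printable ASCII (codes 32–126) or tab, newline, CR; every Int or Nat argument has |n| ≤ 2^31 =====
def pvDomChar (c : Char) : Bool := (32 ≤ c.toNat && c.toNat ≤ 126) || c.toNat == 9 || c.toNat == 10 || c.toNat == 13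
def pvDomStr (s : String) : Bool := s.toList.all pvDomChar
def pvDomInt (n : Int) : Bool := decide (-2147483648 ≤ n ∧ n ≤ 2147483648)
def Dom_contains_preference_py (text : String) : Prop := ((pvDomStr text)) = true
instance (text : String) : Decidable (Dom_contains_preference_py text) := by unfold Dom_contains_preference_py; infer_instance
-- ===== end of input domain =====

-- B replaces seven independent substring searches with one left-to-right scan testing every
-- phrase at each position (objective: alternative, same cost).

-- ===== PORT A =====
-- any(ind in text for ind in indicators)
def contains_preference_py (text : String) : Bool :=
  let indicators : List String :=
    ["i prefer", "i like", "i'd rather", "my preference", "always use", "never use", "please use"]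
  indicators.any (fun ind => PySem.Str.isIn ind text)

-- ===== PORT B =====
-- the phrase tuple of Source B, as lists of characters
def pvPhrases : List (List Char) :=
  ["i prefer".toList, "i like".toList, "i'd rather".toList, "my preference".toList,
   "always use".toList, "never use".toList, "please use".toList]

-- Source B's loop: for each position i (i.e. each nonempty suffix), text.startswith(p, i) for some phrase p
def pvScan (cs : List Char) : Bool :=
  match cs with
  | [] => false
  | c :: t => pvPhrases.any (fun p => PySem.Chars.startswith (c :: t) p) || pvScan t

def contains_preference_py_alt (text : String) : Bool := pvScan text.toList

-- ===== PRECONDITION & SPEC =====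
def Spec_contains_preference_py (text : String) (out : Bool) : Prop := out = contains_preference_py_alt text
instance (text : String) (out : Bool) : Decidable (Spec_contains_preference_py text out) := by unfold Spec_contains_preference_py; infer_instance

-- ===== CLAIM (what is proved, stated in full; the proofs are below) =====
def Claim_equal_contains_preference_py : Prop := ∀ (text : String), Dom_contains_preference_py text → Spec_contains_preference_py text (contains_preference_py text)

-- ===== LEMMAS AND PROOFS =====
theorem pvScan_iff (cs : List Char) : pvScan cs = true ↔ ∃ p ∈ pvPhrases, p <:+: cs := by
  induction cs with
  | nil =>
    simp only [pvScan, List.infix_nil]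
    decide
  | cons c t ih =>
    simp only [pvScan, Bool.or_eq_true, List.any_eq_true, PySem.Chars.startswith_iff, ih]
    constructor
    · rintro (⟨p, hp, hpre⟩ | ⟨p, hp, hinf⟩)
      · exact ⟨p, hp, hpre.isInfix⟩
      · exact ⟨p, hp, hinf.trans (List.suffix_cons c t).isInfix⟩
    · rintro ⟨p, hp, hinf⟩
      rcases (List.infix_cons_iff).1 hinf with hpre | hinf'
      · exact Or.inl ⟨p, hp, hpre⟩
      · exact Or.inr ⟨p, hp, hinf'⟩

-- ===== VERDICT (by name: the statement is the Claim_ definition above) =====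
theorem contains_preference_py_spec : Claim_equal_contains_preference_py := by
  intro text _
  unfold Spec_contains_preference_py contains_preference_py contains_preference_py_alt
  rw [Bool.eq_iff_iff, pvScan_iff]
  simp only [List.any_eq_true, PySem.Str.isIn_iff_infix]
  constructor
  · rintro ⟨ind, hind, hinf⟩
    refine ⟨ind.toList, ?_, hinf⟩
    fin_cases hind <;> simp [pvPhrases]
  · rintro ⟨p, hp, hinf⟩
    fin_cases hp
    · exact ⟨"i prefer", by simp, hinf⟩
    · exact ⟨"i like", by simp, hinf⟩
    · exact ⟨"i'd rather", by simp, hinf⟩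
    · exact ⟨"my preference", by simp, hinf⟩
    · exact ⟨"always use", by simp, hinf⟩
    · exact ⟨"never use", by simp, hinf⟩
    · exact ⟨"please use", by simp, hinf⟩
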